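-- pv_equiv track=rewrite | github.com/ThirVondukr/passlib | passlib/pwd.py | _dup_repr
-- ===== SOURCE A (Python) =====
-- def _dup_repr(source):
--     """
--     helper for generator errors --
--     displays (abbreviated) repr of the duplicates in a string/list
--     """
--     seen = set()
--     dups = set()
--     for elem in source:
--         (dups if elem in seen else seen).add(elem)
--     dups = sorted(dups)
--     trunc = 8
--     if len(dups) > trunc:
--         trunc = 5
--     dup_repr = ", ".join(repr(str(word)) for word in dups[:trunc])
--     if len(dups) > trunc:
--         dup_repr += ", ... plus %d others" % (len(dups) - trunc)
--     return dup_repr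
-- ===== SOURCE B (Python) =====
-- def _dup_repr(source):
--     """
--     helper for generator errors --
--     displays (abbreviated) repr of the duplicates in a string/list
--     """
--     ordered = sorted(source)
--     dups = []
--     for prev, cur in zip(ordered, ordered[1:]):
--         if prev == cur:
--             if not dups or dups[-1] != cur:
--                 dups.append(cur)
--     trunc = 8
--     if len(dups) > trunc:
--         trunc = 5
--     text = ", ".join(repr(str(word)) for word in dups[:trunc])
--     if len(dups) > trunc:
--         text += ", ... plus %d others" % (len(dups) - trunc)
--     return text
-- ===== Notes on version B (the rewrite author's own statement) =====
-- stated objective: alternative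
-- what changed: Replaces A's hash-based seen/dups two-set detection with a sort-first algorithm: sort the whole input once, then a single scan over adjacent pairs of the sorted list collects each value that repeats (adjacent-equal pair, deduplicated against the last collected value) -- the duplicates come out already sorted, so no per-element set membership and no separate sort of the duplicate set; the truncated-repr formatting is unchanged.
import Mathlib
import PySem

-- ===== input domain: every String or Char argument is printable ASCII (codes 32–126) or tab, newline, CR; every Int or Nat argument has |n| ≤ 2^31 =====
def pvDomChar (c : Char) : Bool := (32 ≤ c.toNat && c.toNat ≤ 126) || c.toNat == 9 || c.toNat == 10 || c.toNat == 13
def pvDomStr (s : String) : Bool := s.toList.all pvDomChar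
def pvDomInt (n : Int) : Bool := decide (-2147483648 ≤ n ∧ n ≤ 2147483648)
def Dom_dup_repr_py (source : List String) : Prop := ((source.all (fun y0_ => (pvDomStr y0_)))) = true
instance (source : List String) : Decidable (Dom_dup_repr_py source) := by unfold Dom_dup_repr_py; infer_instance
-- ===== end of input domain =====

-- B replaces A's hash-based seen/dups two-set detection by a sort-first pass that reads the
-- duplicates off adjacent equal pairs of the sorted input (objective: alternative; same cost class).

-- repr(str(w)) for a Python str on the ASCII-printable (+tab/newline/CR) domain, ported by hand:
-- CPython picks '"' iff the string contains '\'' and no '"', escapes the backslash, the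
-- chosen quote, and tab/newline/CR; every other domain character is printed as-is (exact on Dom).
def pyReprStr (s : String) : String :=
  let cs := s.toList
  let q : Char := if cs.contains '\'' && !(cs.contains '"') then '"' else '\''
  String.ofList ((q :: cs.flatMap (fun c =>
    if c = '\\' then ['\\', '\\']
    else if c = q then ['\\', q]
    else if c = '\t' then ['\\', 't']
    else if c = '\n' then ['\\', 'n']
    else if c = '\r' then ['\\', 'r']
    else [c])) ++ [q])

-- ===== PORT A =====
-- A's loop step: (dups if elem in seen else seen).add(elem)
def aStep (p : PySem.Set String × PySem.Set String) (elem : String) :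
    PySem.Set String × PySem.Set String :=
  if PySem.Set.contains p.1 elem then (p.1, PySem.Set.add p.2 elem)
  else (PySem.Set.add p.1 elem, p.2)

def dup_repr_py (source : List String) : String :=
  let st := source.foldl aStep (PySem.Set.empty, PySem.Set.empty)
  let dups := PySem.List.sorted st.2 (fun x => x) false
  let trunc : Int := if (dups.length : Int) > 8 then 5 else 8
  let dr := PySem.Str.join ", " ((PySem.List.slice dups none (some trunc)).map pyReprStr)
  if (dups.length : Int) > trunc then
    dr ++ ", ... plus " ++ PySem.Int.toStr ((dups.length : Int) - trunc) ++ " others"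
  else dr

-- ===== PORT B =====
-- B's loop step over an adjacent pair (prev, cur) of the sorted list:
--   if prev == cur: if not dups or dups[-1] != cur: dups.append(cur)
def bStep (acc : List String) (p : String × String) : List String :=
  if p.1 = p.2 then
    (if acc = [] ∨ acc.getLast? ≠ some p.2 then acc ++ [p.2] else acc)
  else acc

def dup_repr_py_alt (source : List String) : String :=
  let ordered := PySem.List.sorted source (fun x => x) false
  let dups := (ordered.zip (PySem.List.slice ordered (some 1) none)).foldl bStep []
  let trunc : Int := if (dups.length : Int) > 8 then 5 else 8
  let text := PySem.Str.join ", " ((PySem.List.slice dups none (some trunc)).map pyReprStr)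
  if (dups.length : Int) > trunc then
    text ++ ", ... plus " ++ PySem.Int.toStr ((dups.length : Int) - trunc) ++ " others"
  else text

-- ===== PRECONDITION & SPEC =====
def Spec_dup_repr_py (source : List String) (out : String) : Prop := out = dup_repr_py_alt source
instance (source : List String) (out : String) : Decidable (Spec_dup_repr_py source out) := by unfold Spec_dup_repr_py; infer_instance

-- ===== CLAIM (what is proved, stated in full; the proofs are below) =====
def Claim_equal_dup_repr_py : Prop := ∀ (source : List String), Dom_dup_repr_py source → Spec_dup_repr_py source (dup_repr_py source)

-- ===== LEMMAS AND PROOFS =====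

-- A's loop: membership in the dups set = appears at least twice
lemma aloop_mem (l : List String) (seen dups : List String) (x : String) :
    x ∈ (l.foldl aStep (seen, dups)).2 ↔
      x ∈ dups ∨ (x ∈ seen ∧ x ∈ l) ∨ 2 ≤ l.count x := by
  induction l generalizing seen dups with
  | nil => simp
  | cons e rest ih =>
    by_cases he : e ∈ seen
    · have hc : PySem.Set.contains seen e = true := by
        simpa [PySem.Set.contains_iff] using he
      simp only [List.foldl_cons, aStep, hc, if_pos]
      rw [ih]
      by_cases hxe : x = e
      · subst hxe
        simp [PySem.Set.mem_add, he]
      · simp [PySem.Set.mem_add, hxe, Ne.symm hxe, List.mem_cons]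
    · have hc : PySem.Set.contains seen e = false := by
        simp [he]
      simp only [List.foldl_cons, aStep, hc]
      rw [if_neg (by simp), ih]
      by_cases hxe : x = e
      · subst hxe
        by_cases hd : x ∈ dups
        · simp [PySem.Set.mem_add, hd]
        · simp only [PySem.Set.mem_add, hd, false_or, List.count_cons, List.mem_cons, he,
            BEq.rfl, if_pos, true_or, and_true, or_true, true_and]
          rw [← List.count_pos_iff]
          omega
      · simp [PySem.Set.mem_add, hxe, Ne.symm hxe, List.mem_cons]

lemma aloop_nodup (l : List String) (seen dups : List String) (h : dups.Nodup) :
    (l.foldl aStep (seen, dups)).2.Nodup := by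
  induction l generalizing seen dups with
  | nil => simpa
  | cons e rest ih =>
    simp only [List.foldl_cons, aStep]
    by_cases hc : PySem.Set.contains seen e
    · simp only [hc, if_pos]
      exact ih _ _ (PySem.Set.nodup_add dups e h)
    · rw [if_neg hc]
      exact ih _ _ h

-- adjacent equal pairs of a ≤-sorted list: the second components are exactly the repeated values
lemma adj_mem (s : List String) (hs : s.Pairwise (· ≤ ·)) (x : String) :
    x ∈ ((s.zip s.tail).filter (fun p => decide (p.1 = p.2))).map Prod.snd ↔ 2 ≤ s.count x := by
  induction s with
  | nil => simp
  | cons a t ih =>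
    cases t with
    | nil =>
      rcases eq_or_ne x a with rfl | h
      · simp
      · simp [Ne.symm h]
    | cons b u =>
      have hab : a ≤ b := (List.pairwise_cons.1 hs).1 b (by simp)
      have hrest := ih (List.pairwise_cons.1 hs).2
      simp only [List.tail_cons, List.zip_cons_cons, List.filter_cons] at hrest ⊢
      by_cases heq : a = b
      · subst heq
        rw [if_pos (show decide ((a, a).1 = (a, a).2) = true by simp)]
        simp only [List.map_cons, List.mem_cons]
        rw [hrest]
        by_cases hx : x = a
        · subst hx
          simp only [List.count_cons, BEq.rfl, if_pos, true_or, true_iff]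
          omega
        · simp only [hx, false_or, List.count_cons]
          simp [Ne.symm hx]
      · rw [if_neg (show ¬ decide ((a, b).1 = (a, b).2) = true by simpa using heq)]
        rw [hrest]
        have hlt : a < b := lt_of_le_of_ne hab heq
        have hnot : ∀ z ∈ b :: u, a < z := by
          intro z hz
          rcases List.mem_cons.1 hz with rfl | hz
          · exact hlt
          · exact lt_of_lt_of_le hlt ((List.pairwise_cons.1 (List.pairwise_cons.1 hs).2).1 z hz)
        by_cases hx : x = a
        · subst hx
          have h0 : (b :: u).count x = 0 :=
            List.count_eq_zero.2 (fun hmem => lt_irrefl x (hnot x hmem))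
          simp only [List.count_cons, BEq.rfl, if_pos, h0]
          omega
        · simp [List.count_cons, Ne.symm hx]

-- in a strictly sorted list every element is ≤ the last one
lemma le_getLast_of_pairwise_lt (l : List String) (h : l.Pairwise (· < ·)) (hne : l ≠ []) :
    ∀ y ∈ l, y ≤ l.getLast hne := by
  induction l with
  | nil => cases hne rfl
  | cons a t ih =>
    cases t with
    | nil =>
      intro y hy
      simp only [List.mem_singleton] at hy
      simp [hy, List.getLast]
    | cons b u =>
      intro y hy
      rw [List.getLast_cons (by simp)]
      have ht := (List.pairwise_cons.1 h).2
      rcases List.mem_cons.1 hy with rfl | hy'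
      · have hb : y < b := (List.pairwise_cons.1 h).1 b (by simp)
        exact le_trans (le_of_lt hb) (ih ht (by simp) b (by simp))
      · exact ih ht (by simp) y hy'

-- the dedup-last fold: keeps the list strictly sorted and preserves the set of values
lemma dedup_fold (M acc : List String) (hM : M.Pairwise (· ≤ ·))
    (hacc : acc.Pairwise (· < ·)) (hle : ∀ y ∈ acc, ∀ z ∈ M, y ≤ z) :
    (M.foldl (fun acc x => if acc = [] ∨ acc.getLast? ≠ some x then acc ++ [x] else acc) acc).Pairwise (· < ·) ∧
    ∀ x, (x ∈ M.foldl (fun acc x => if acc = [] ∨ acc.getLast? ≠ some x then acc ++ [x] else acc) acc ↔ x ∈ acc ∨ x ∈ M) := by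
  induction M generalizing acc with
  | nil => exact ⟨hacc, by simp⟩
  | cons m M' ih =>
    have hM' := (List.pairwise_cons.1 hM).2
    have hmle : ∀ z ∈ M', m ≤ z := (List.pairwise_cons.1 hM).1
    simp only [List.foldl_cons]
    by_cases hguard : acc = [] ∨ acc.getLast? ≠ some m
    · rw [if_pos hguard]
      have hyltm : ∀ y ∈ acc, y < m := by
        intro y hy
        have hne : acc ≠ [] := by rintro rfl; cases hy
        have hylast : y ≤ acc.getLast hne := le_getLast_of_pairwise_lt acc hacc hne y hy
        have hlastm : acc.getLast hne ≤ m :=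
          hle _ (List.getLast_mem hne) m (by simp)
        have hlastne : acc.getLast hne ≠ m := by
          intro h
          rcases hguard with h0 | h0
          · exact hne h0
          · exact h0 (by rw [List.getLast?_eq_some_getLast hne, h])
        exact lt_of_le_of_lt hylast (lt_of_le_of_ne hlastm hlastne)
      have hacc' : (acc ++ [m]).Pairwise (· < ·) := by
        rw [List.pairwise_append]
        exact ⟨hacc, by simp, by simpa using hyltm⟩
      have hle' : ∀ y ∈ acc ++ [m], ∀ z ∈ M', y ≤ z := by
        intro y hy z hz
        rcases List.mem_append.1 hy with hy' | hy'
        · exact hle y hy' z (by simp [hz])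
        · simp only [List.mem_singleton] at hy'
          subst hy'
          exact hmle z hz
      obtain ⟨h1, h2⟩ := ih (acc ++ [m]) hM' hacc' hle'
      refine ⟨h1, fun x => ?_⟩
      rw [h2]
      simp [List.mem_append, or_assoc]
    · rw [if_neg hguard]
      rw [not_or, not_not] at hguard
      obtain ⟨hne, hlast⟩ := hguard
      have hm : m ∈ acc := by
        have h2 := List.getLast?_eq_some_getLast (l := acc) hne
        rw [hlast] at h2
        have hmeq : m = acc.getLast hne := Option.some_injective _ h2
        rw [hmeq]
        exact List.getLast_mem hne
      obtain ⟨h1, h2⟩ := ih acc hM' hacc (fun y hy z hz => hle y hy z (List.mem_cons_of_mem m hz))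
      refine ⟨h1, fun x => ?_⟩
      rw [h2]
      constructor
      · rintro (h | h)
        · exact Or.inl h
        · exact Or.inr (by simp [h])
      · rintro (h | h)
        · exact Or.inl h
        · rcases List.mem_cons.1 h with rfl | h'
          · exact Or.inl hm
          · exact Or.inr h'

-- B's duplicate list is strictly sorted and holds exactly the values repeated in source
lemma bdups_spec (source : List String) :
    (((PySem.List.sorted source (fun x => x) false).zip
        (PySem.List.slice (PySem.List.sorted source (fun x => x) false) (some 1) none)).foldl bStep []).Pairwise (· < ·) ∧
    ∀ x, (x ∈ ((PySem.List.sorted source (fun x => x) false).zip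
        (PySem.List.slice (PySem.List.sorted source (fun x => x) false) (some 1) none)).foldl bStep [] ↔
      2 ≤ source.count x) := by
  have hsort : (PySem.List.sorted source (fun x => x) false).Pairwise (· ≤ ·) :=
    PySem.List.sorted_pairwise source (fun x => x)
  set ordered := PySem.List.sorted source (fun x => x) false with hord
  have hfold : (ordered.zip (PySem.List.slice ordered (some 1) none)).foldl bStep [] =
      ((((ordered.zip ordered.tail).filter (fun p => decide (p.1 = p.2))).map Prod.snd).foldl
        (fun acc x => if acc = [] ∨ acc.getLast? ≠ some x then acc ++ [x] else acc) []) := by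
    rw [PySem.List.slice_from_one]
    rw [List.foldl_map]
    exact PySem.List.foldl_ite_eq_foldl_filter (fun (p : String × String) => p.1 = p.2)
      (fun acc p => if acc = [] ∨ acc.getLast? ≠ some p.2 then acc ++ [p.2] else acc)
      (ordered.zip ordered.tail) []
  have hMsort : (((ordered.zip ordered.tail).filter (fun p => decide (p.1 = p.2))).map
      Prod.snd).Pairwise (· ≤ ·) := by
    have hsub : (((ordered.zip ordered.tail).filter (fun p => decide (p.1 = p.2))).map
        Prod.snd).Sublist ordered.tail := by
      have h1 : (((ordered.zip ordered.tail).filter (fun p => decide (p.1 = p.2))).map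
          Prod.snd).Sublist ((ordered.zip ordered.tail).map Prod.snd) :=
        List.Sublist.map Prod.snd List.filter_sublist
      rwa [List.map_snd_zip (l₁ := ordered) (l₂ := ordered.tail)
        (by rw [List.length_tail]; omega)] at h1
    exact List.Pairwise.sublist hsub (List.Pairwise.sublist (List.tail_sublist ordered) hsort)
  obtain ⟨h1, h2⟩ := dedup_fold _ [] hMsort (by simp) (by simp)
  rw [← hfold] at h1 h2
  refine ⟨h1, fun x => ?_⟩
  rw [h2]
  simp only [List.not_mem_nil, false_or]
  rw [adj_mem ordered hsort]
  have hc : ordered.count x = source.count x :=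
    (PySem.List.sorted_perm source (fun x => x) false).count_eq x
  omega

-- A's sorted dups list equals B's dups list
lemma dups_eq (source : List String) :
    PySem.List.sorted (source.foldl aStep (PySem.Set.empty, PySem.Set.empty)).2 (fun x => x) false
    = ((PySem.List.sorted source (fun x => x) false).zip
        (PySem.List.slice (PySem.List.sorted source (fun x => x) false) (some 1) none)).foldl bStep [] := by
  obtain ⟨hlt, hmem⟩ := bdups_spec source
  apply PySem.List.sorted_eq_of_perm_of_pairwise_lt
  · apply (List.perm_ext_iff_of_nodup hlt.nodup
      (aloop_nodup _ _ _ (by simp [PySem.Set.empty]))).2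
    intro x
    rw [hmem x, aloop_mem]
    simp only [PySem.Set.empty, List.not_mem_nil, false_and, false_or]
  · exact hlt

-- ===== VERDICT (by name: the statement is the Claim_ definition above) =====
theorem dup_repr_py_spec : Claim_equal_dup_repr_py := by
  intro source _
  unfold Spec_dup_repr_py dup_repr_py dup_repr_py_alt
  dsimp only
  rw [dups_eq source]
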